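-- pv_equiv track=rewrite | github.com/coolstuffinc/yugiohgx-da | src/ygogxda/passwords.py | inverse_hash
-- ===== SOURCE A (Python) =====
-- def inverse_hash(hashed: int):
--     """ Reversed eng. hash """
--     i = 8;
--     digits = ''
--     while i > 0:
--         i -= 1;
--         digit = hashed // 16**i;
--         hashed = hashed % 16**i
--         digits += str(digit)
--     return digits
-- ===== SOURCE B (Python) =====
-- def inverse_hash(hashed: int):
--     """ Reversed eng. hash """
--     n = hashed
--     parts = []
--     for _ in range(7):
--         n, d = divmod(n, 16)
--         parts.append(str(d))
--     parts.append(str(n))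
--     return ''.join(reversed(parts))
-- ===== Notes on version B (the rewrite author's own statement) =====
-- stated objective: alternative
-- what changed: Builds the digit string least-significant-first by threading the quotient through divmod (seven steps, the leftover quotient filling the top slot) and joining the reversed list, instead of A's most-significant-first loop that divides and reduces by a freshly computed power of sixteen each iteration.
import Mathlib
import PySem

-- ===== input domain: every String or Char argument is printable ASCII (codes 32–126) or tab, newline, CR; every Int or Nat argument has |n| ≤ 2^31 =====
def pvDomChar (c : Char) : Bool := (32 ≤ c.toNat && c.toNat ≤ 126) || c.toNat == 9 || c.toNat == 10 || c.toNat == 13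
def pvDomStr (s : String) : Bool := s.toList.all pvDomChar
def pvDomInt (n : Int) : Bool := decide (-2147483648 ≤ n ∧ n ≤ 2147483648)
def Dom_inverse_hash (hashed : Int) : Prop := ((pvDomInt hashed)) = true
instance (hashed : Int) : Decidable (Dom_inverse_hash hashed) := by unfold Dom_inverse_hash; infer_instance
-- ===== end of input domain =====

-- B builds the digits LSB-first with divmod (quotient threaded, leftover quotient = top slot)
-- and joins the reversed list, instead of A's MSB-first loop dividing by fresh powers 16**i.

-- ===== PORT A =====
-- while i > 0: i -= 1; digit = hashed // 16**i; hashed = hashed % 16**i; digits += str(digit)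
def inverse_hash_loop : Nat → Int → String → String
  | 0, _, digits => digits
  | i + 1, hashed, digits =>
      let digit := PySem.Int.floordiv hashed ((16 : Int) ^ i)
      inverse_hash_loop i (PySem.Int.mod hashed ((16 : Int) ^ i)) (digits ++ PySem.Int.toStr digit)

def inverse_hash (hashed : Int) : String :=
  inverse_hash_loop 8 hashed ""

-- ===== PORT B =====
-- for _ in range(7): n, d = divmod(n, 16); parts.append(str(d)); then parts.append(str(n))
def inverse_hash_alt_loop : Nat → Int → List String → Int × List String
  | 0, n, parts => (n, parts)
  | k + 1, n, parts =>
      let q := PySem.Int.floordiv n 16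
      let d := PySem.Int.mod n 16
      inverse_hash_alt_loop k q (parts ++ [PySem.Int.toStr d])

def inverse_hash_alt (hashed : Int) : String :=
  let r := inverse_hash_alt_loop 7 hashed []
  PySem.Str.join "" ((r.2 ++ [PySem.Int.toStr r.1]).reverse)

-- ===== PRECONDITION & SPEC =====
def Spec_inverse_hash (hashed : Int) (out : String) : Prop := out = inverse_hash_alt hashed
instance (hashed : Int) (out : String) : Decidable (Spec_inverse_hash hashed out) := by unfold Spec_inverse_hash; infer_instance

-- ===== CLAIM (what is proved, stated in full; the proofs are below) =====
def Claim_equal_inverse_hash : Prop := ∀ (hashed : Int), Dom_inverse_hash hashed → Spec_inverse_hash hashed (inverse_hash hashed)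

-- ===== LEMMAS AND PROOFS =====

-- the j-th base-16 digit of n (floor semantics), as Python str
def pvDig (n : Int) (j : Nat) : String := PySem.Int.toStr ((n / (16 : Int) ^ j) % 16)

theorem pvPowPos (i : Nat) : (0 : Int) < 16 ^ i := pow_pos (by norm_num) i

-- joining with the empty separator peels off the head
theorem join_empty_cons (a : String) (l : List String) :
    PySem.Str.join "" (a :: l) = a ++ PySem.Str.join "" l := by
  cases l with
  | nil => simp [PySem.Str.join, PySem.Chars.join_singleton, PySem.Chars.join_nil]
  | cons b t =>
    rw [← String.toList_inj]
    simp [PySem.Str.join, PySem.Chars.join_cons_cons]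

-- key arithmetic identity: (n % 16^(i+1)) / 16^i = (n / 16^i) % 16
theorem pvKey (n : Int) (i : Nat) :
    (n % (16 : Int) ^ (i + 1)) / (16 : Int) ^ i = (n / (16 : Int) ^ i) % 16 := by
  have hb : (0 : Int) < 16 ^ i := pvPowPos i
  have hb' : ((16 : Int) ^ i) ≠ 0 := ne_of_gt hb
  have h1 : n % (16 : Int) ^ (i + 1) = n + (16 : Int) ^ i * (-(16 * (n / ((16 : Int) ^ i * 16)))) := by
    rw [Int.emod_def, pow_succ]; ring
  rw [h1, Int.add_mul_ediv_left _ _ hb']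
  have h2 : n / (16 : Int) ^ i / 16 = n / ((16 : Int) ^ i * 16) :=
    Int.ediv_ediv_of_nonneg (le_of_lt hb)
  rw [Int.emod_def, h2]
  ring

-- A's loop appends to its accumulator
theorem loopA_append (k : Nat) : ∀ (n : Int) (s : String),
    inverse_hash_loop k n s = s ++ inverse_hash_loop k n "" := by
  induction k with
  | zero => intro n s; simp [inverse_hash_loop]
  | succ k ih =>
      intro n s
      simp only [inverse_hash_loop]
      rw [ih, ih (PySem.Int.mod n ((16:Int)^k)) ("" ++ _)]
      simp [String.append_assoc]

-- below the top slot, A's loop produces the low base-16 digits MSB-first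
theorem loopA_digits (k : Nat) : ∀ (n : Int),
    inverse_hash_loop k (n % (16 : Int) ^ k) "" =
      PySem.Str.join "" (((List.range k).map (pvDig n)).reverse) := by
  induction k with
  | zero =>
      intro n
      rw [← String.toList_inj]
      simp [inverse_hash_loop, PySem.Str.join, PySem.Chars.join_nil]
  | succ k ih =>
      intro n
      have hdvd : ((16:Int)^k) ∣ ((16:Int)^(k+1)) := pow_dvd_pow _ (Nat.le_succ k)
      simp only [inverse_hash_loop, PySem.Int.floordiv_eq_ediv_of_pos (pvPowPos k),
        PySem.Int.mod_eq_emod_of_pos (pvPowPos k)]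
      rw [Int.emod_emod_of_dvd n hdvd, loopA_append, ih, pvKey n k, List.range_succ]
      simp [pvDig, join_empty_cons]

-- B's loop: the quotient composes, the parts list accumulates the digits LSB-first
theorem loopB_spec (k : Nat) : ∀ (n : Int) (p : List String),
    inverse_hash_alt_loop k n p =
      (n / (16 : Int) ^ k, p ++ (List.range k).map (pvDig n)) := by
  induction k with
  | zero => intro n p; simp [inverse_hash_alt_loop]
  | succ k ih =>
      intro n p
      simp only [inverse_hash_alt_loop,
        PySem.Int.floordiv_eq_ediv_of_pos (show (0:Int) < 16 by norm_num),
        PySem.Int.mod_eq_emod_of_pos (show (0:Int) < 16 by norm_num)]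
      rw [ih]
      simp only [Prod.mk.injEq]
      constructor
      · rw [Int.ediv_ediv_of_nonneg (show (0:Int) ≤ 16 by norm_num), ← pow_succ']
      · have hdig : ∀ j, pvDig (n / 16) j = pvDig n (j + 1) := by
          intro j
          unfold pvDig
          rw [Int.ediv_ediv_of_nonneg (show (0:Int) ≤ 16 by norm_num), ← pow_succ']
        rw [List.range_succ_eq_map]
        simp only [List.map_cons, List.map_map, Function.comp_def, pvDig, pow_zero,
          Int.ediv_one, List.append_assoc, List.singleton_append]
        refine congrArg _ (congrArg _ (List.map_congr_left ?_))
        intro j _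
        rw [hdig j]; rfl

-- ===== VERDICT (by name: the statement is the Claim_ definition above) =====
theorem inverse_hash_spec : Claim_equal_inverse_hash := by
  intro hashed _
  unfold Spec_inverse_hash
  have hB : inverse_hash_alt hashed =
      PySem.Str.join "" ((List.map (pvDig hashed) (List.range 7) ++
        [PySem.Int.toStr (hashed / (16:Int) ^ 7)]).reverse) := by
    simp [inverse_hash_alt, loopB_spec]
  have hA : inverse_hash hashed =
      PySem.Int.toStr (hashed / (16:Int) ^ 7) ++
        PySem.Str.join "" ((List.map (pvDig hashed) (List.range 7)).reverse) := by
    show inverse_hash_loop 7 (PySem.Int.mod hashed ((16:Int) ^ 7))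
        ("" ++ PySem.Int.toStr (PySem.Int.floordiv hashed ((16:Int) ^ 7))) = _
    rw [loopA_append, PySem.Int.mod_eq_emod_of_pos (pvPowPos 7), loopA_digits,
      PySem.Int.floordiv_eq_ediv_of_pos (pvPowPos 7)]
    simp
  rw [hA, hB, List.reverse_append]
  simp [join_empty_cons]
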